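-- pv_equiv track=rewrite | github.com/shaydulin/yandex_training_8 | pset3/g_superstring_gravity.py | calc
-- ===== SOURCE A (Python) =====
-- from bisect import bisect_left
-- from itertools import accumulate
--
-- def calc(n, coords_a, m, coords_b):
--     ans = 0
--     idcs_b = sorted(range(m), key=lambda i: coords_b[i])
--
--     def f1(prev, j):
--         return prev + coords_b[j]
--
--     def f2(prev, j):
--         return prev + j * coords_b[j]
--
--     idcs_b_prefix_sum = [*accumulate(idcs_b)]
--     vals_b_prefix_sum = [*accumulate(idcs_b, func=f1, initial=0)][1:]
--     vals_b_mul_idcs_b_prefix_sum = [*accumulate(idcs_b, func=f2, initial=0)][1:]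
--     for i in range(n):
--         idx = bisect_left(
--             idcs_b,
--             coords_a[i],
--             key=lambda j: coords_b[j],
--         )
--         if idx > 0:
--             ans += (
--                 (i * idx - idcs_b_prefix_sum[idx - 1]) * coords_a[i]
--                 -i * vals_b_prefix_sum[idx - 1]
--                 +vals_b_mul_idcs_b_prefix_sum[idx - 1]
--             )
--         if idx < m:
--             idcs_sm = i * (m - idx) - (idcs_b_prefix_sum[-1] - (idcs_b_prefix_sum[idx - 1] if idx else 0))
--             vals_sm = vals_b_prefix_sum[-1] - (vals_b_prefix_sum[idx - 1] if idx else 0)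
--             vals_mul_idcs_sm = vals_b_mul_idcs_b_prefix_sum[-1] - (vals_b_mul_idcs_b_prefix_sum[idx - 1] if idx else 0)
--             ans += (
--                 -(idcs_sm) * coords_a[i]
--                 +i * (vals_sm)
--                 -(vals_mul_idcs_sm)
--             )
--
--     return ans
-- ===== SOURCE B (Python) =====
-- def calc(n, coords_a, m, coords_b):
--     # Direct definition: sum of (i - j) * |a_i - b_j| over all pairs.
--     ans = 0
--     for i in range(n):
--         for j in range(m):
--             ans += (i - j) * abs(coords_a[i] - coords_b[j])
--     return ans
-- ===== Notes on version B (the rewrite author's own statement) =====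
-- stated objective: simpler
-- what changed: Replaced A's sort + three prefix-sum arrays + per-point binary search with the direct brute-force double loop summing (i-j)*|a_i-b_j| over all pairs.
import Mathlib
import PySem

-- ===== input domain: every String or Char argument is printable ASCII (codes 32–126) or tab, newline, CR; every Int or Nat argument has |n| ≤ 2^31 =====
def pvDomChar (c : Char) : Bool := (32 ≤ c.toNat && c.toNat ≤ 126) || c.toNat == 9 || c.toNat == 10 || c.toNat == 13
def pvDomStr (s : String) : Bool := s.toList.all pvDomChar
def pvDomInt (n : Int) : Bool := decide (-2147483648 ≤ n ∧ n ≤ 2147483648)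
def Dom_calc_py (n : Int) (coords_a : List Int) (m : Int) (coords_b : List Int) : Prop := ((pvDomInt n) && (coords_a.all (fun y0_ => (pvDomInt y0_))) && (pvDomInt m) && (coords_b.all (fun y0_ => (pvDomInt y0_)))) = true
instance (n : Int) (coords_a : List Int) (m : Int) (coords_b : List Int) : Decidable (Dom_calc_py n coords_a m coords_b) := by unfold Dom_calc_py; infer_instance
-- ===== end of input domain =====

-- B replaces A's sort + prefix sums + binary search by the direct double loop over all
-- pairs (simpler, not faster); equivalence is about the return value, neither mutates.

-- ===== PORT A =====
-- itertools.accumulate(xs, func=f, initial=0) followed by [1:]; for the no-initial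
-- accumulate(idcs_b) the same definition with f = (+), c = 0 is exact since 0 + x₀ = x₀.
def pyAccumulate (f : Int → Int → Int) (c : Int) (xs : List Int) : List Int :=
  (List.scanl f c xs).drop 1

def calc_py (n : Int) (coords_a : List Int) (m : Int) (coords_b : List Int) : Int :=
  let kf : Int → Int := fun j => PySem.List.pyGetD coords_b j 0   -- the key lambda i: coords_b[i]
  let idcs_b := PySem.List.sorted (PySem.List.pyRange 0 m 1) kf
  let idcs_b_prefix_sum := pyAccumulate (fun prev j => prev + j) 0 idcs_b
  let vals_b_prefix_sum := pyAccumulate (fun prev j => prev + kf j) 0 idcs_b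
  let vals_b_mul_idcs_b_prefix_sum := pyAccumulate (fun prev j => prev + j * kf j) 0 idcs_b
  (PySem.List.pyRange 0 n 1).foldl
    (fun ans i =>
      let x := PySem.List.pyGetD coords_a i 0
      -- bisect_left(idcs_b, x, key=…) = bisect_left on the keyed view
      let idx : Int := (PySem.List.bisectLeft (idcs_b.map kf) x : Nat)
      let ans1 :=
        if 0 < idx then
          ans + ((i * idx - PySem.List.pyGetD idcs_b_prefix_sum (idx - 1) 0) * x
                 - i * PySem.List.pyGetD vals_b_prefix_sum (idx - 1) 0
                 + PySem.List.pyGetD vals_b_mul_idcs_b_prefix_sum (idx - 1) 0)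
        else ans
      if idx < m then
        let idcs_sm := i * (m - idx) - (PySem.List.pyGetD idcs_b_prefix_sum (-1) 0
            - (if idx ≠ 0 then PySem.List.pyGetD idcs_b_prefix_sum (idx - 1) 0 else 0))
        let vals_sm := PySem.List.pyGetD vals_b_prefix_sum (-1) 0
            - (if idx ≠ 0 then PySem.List.pyGetD vals_b_prefix_sum (idx - 1) 0 else 0)
        let vals_mul_idcs_sm := PySem.List.pyGetD vals_b_mul_idcs_b_prefix_sum (-1) 0
            - (if idx ≠ 0 then PySem.List.pyGetD vals_b_mul_idcs_b_prefix_sum (idx - 1) 0 else 0)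
        ans1 + (-idcs_sm * x + i * vals_sm - vals_mul_idcs_sm)
      else ans1)
    0

-- ===== PORT B =====
def calc_py_alt (n : Int) (coords_a : List Int) (m : Int) (coords_b : List Int) : Int :=
  (PySem.List.pyRange 0 n 1).foldl
    (fun ans i =>
      (PySem.List.pyRange 0 m 1).foldl
        (fun ans j => ans + (i - j) * |PySem.List.pyGetD coords_a i 0 - PySem.List.pyGetD coords_b j 0|)
        ans)
    0

-- ===== PRECONDITION & SPEC =====
-- Exactly where Python A returns: it raises IndexError iff m > len(coords_b)
-- (key evaluation while sorting) or n > len(coords_a) (coords_a[i] in the loop).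
def Pre_calc_py (n : Int) (coords_a : List Int) (m : Int) (coords_b : List Int) : Prop :=
  n ≤ (coords_a.length : Int) ∧ m ≤ (coords_b.length : Int)
instance (n : Int) (coords_a : List Int) (m : Int) (coords_b : List Int) : Decidable (Pre_calc_py n coords_a m coords_b) := by unfold Pre_calc_py; infer_instance

def pvWitness_calc_py : Int × List Int × Int × List Int := (2, [1, 5], 2, [3, 4])

def Spec_calc_py (n : Int) (coords_a : List Int) (m : Int) (coords_b : List Int) (out : Int) : Prop := out = calc_py_alt n coords_a m coords_b
instance (n : Int) (coords_a : List Int) (m : Int) (coords_b : List Int) (out : Int) : Decidable (Spec_calc_py n coords_a m coords_b out) := by unfold Spec_calc_py; infer_instance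

-- ===== CLAIM (what is proved, stated in full; the proofs are below) =====
def Claim_equal_calc_py : Prop := ∀ (n : Int) (coords_a : List Int) (m : Int) (coords_b : List Int), Dom_calc_py n coords_a m coords_b → Pre_calc_py n coords_a m coords_b → Spec_calc_py n coords_a m coords_b (calc_py n coords_a m coords_b)

-- ===== LEMMAS AND PROOFS =====

theorem pacc_cons (f : Int → Int → Int) (c x : Int) (xs : List Int) :
    pyAccumulate f c (x :: xs) = f c x :: pyAccumulate f (f c x) xs := by
  cases xs with
  | nil => simp [pyAccumulate]
  | cons y ys => simp [pyAccumulate, List.scanl_cons]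

theorem pacc_length (f : Int → Int → Int) (c : Int) (xs : List Int) :
    (pyAccumulate f c xs).length = xs.length := by
  induction xs generalizing c with
  | nil => simp [pyAccumulate]
  | cons x xs ih => simp [pacc_cons, ih]

theorem pacc_getD (f : Int → Int → Int) (c : Int) (xs : List Int) (k : Nat)
    (hk : k < xs.length) :
    (pyAccumulate f c xs).getD k 0 = (xs.take (k + 1)).foldl f c := by
  induction xs generalizing c k with
  | nil => simp at hk
  | cons x xs ih =>
    cases k with
    | zero => simp [pacc_cons]
    | succ k =>
      simp only [List.length_cons, Nat.succ_lt_succ_iff] at hk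
      simpa [pacc_cons, List.getD] using ih (f c x) k hk

theorem pacc_pyGetD (f : Int → Int → Int) (xs : List Int) (k : Nat) (hk : k < xs.length) :
    PySem.List.pyGetD (pyAccumulate f 0 xs) (k : Int) 0 = (xs.take (k + 1)).foldl f 0 := by
  rw [PySem.List.pyGetD_natCast, pacc_getD f 0 xs k hk]

theorem pacc_pyGetD_last (f : Int → Int → Int) (xs : List Int) (h : 0 < xs.length) :
    PySem.List.pyGetD (pyAccumulate f 0 xs) (-1) 0 = xs.foldl f 0 := by
  have hlen : (pyAccumulate f 0 xs).length = xs.length := pacc_length f 0 xs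
  have h1 : 1 ≤ (pyAccumulate f 0 xs).length := by omega
  rw [PySem.List.pyGetD_neg_ofNat (pyAccumulate f 0 xs) 1 0 (by omega) h1]
  have h2 : (pyAccumulate f 0 xs).length - 1 < (pyAccumulate f 0 xs).length := by omega
  rw [← List.getD_eq_getElem (pyAccumulate f 0 xs) 0 h2, hlen,
      pacc_getD f 0 xs (xs.length - 1) (by omega)]
  congr 1
  rw [Nat.sub_add_cancel (by omega), List.take_length]

theorem sum_expand_lt (i x : Int) (kf : Int → Int) (P : List Int)
    (h : ∀ j ∈ P, kf j < x) :
    (P.map (fun j => (i - j) * |x - kf j|)).sum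
      = (i * P.length - P.sum) * x - i * (P.map kf).sum
        + (P.map (fun j => j * kf j)).sum := by
  induction P with
  | nil => simp
  | cons p P ih =>
    have hp : kf p < x := h p (List.mem_cons_self)
    have habs : |x - kf p| = x - kf p := abs_of_pos (by omega)
    simp only [List.map_cons, List.sum_cons, List.length_cons,
      ih (fun j hj => h j (List.mem_cons_of_mem _ hj)), habs]
    push_cast
    ring

theorem sum_expand_ge (i x : Int) (kf : Int → Int) (S : List Int)
    (h : ∀ j ∈ S, x ≤ kf j) :
    (S.map (fun j => (i - j) * |x - kf j|)).sum
      = -(i * S.length - S.sum) * x + i * (S.map kf).sum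
        - (S.map (fun j => j * kf j)).sum := by
  induction S with
  | nil => simp
  | cons s S ih =>
    have hs : x ≤ kf s := h s (List.mem_cons_self)
    have habs : |x - kf s| = kf s - x := by
      rw [abs_of_nonpos (by omega)]; ring
    simp only [List.map_cons, List.sum_cons, List.length_cons,
      ih (fun j hj => h j (List.mem_cons_of_mem _ hj)), habs]
    push_cast
    ring

theorem foldl_sum_id (P : List Int) :
    P.foldl (fun prev j => prev + j) 0 = P.sum := by
  rw [PySem.List.foldl_add P (fun j => j) 0, List.map_id']; simp

theorem foldl_sum_kf (kf : Int → Int) (P : List Int) :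
    P.foldl (fun prev j => prev + kf j) 0 = (P.map kf).sum := by
  rw [PySem.List.foldl_add P kf 0]; simp

theorem foldl_sum_mul (kf : Int → Int) (P : List Int) :
    P.foldl (fun prev j => prev + j * kf j) 0 = (P.map (fun j => j * kf j)).sum := by
  rw [PySem.List.foldl_add P (fun j => j * kf j) 0]; simp

-- prefix access into an accumulate list = fold over the corresponding take
theorem pacc_prefix (f : Int → Int → Int) (L : List Int) (idxN : Nat)
    (h0 : idxN ≠ 0) (hle : idxN ≤ L.length) :
    PySem.List.pyGetD (pyAccumulate f 0 L) ((idxN : Int) - 1) 0 = (L.take idxN).foldl f 0 := by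
  have hc : ((idxN : Int) - 1) = ((idxN - 1 : Nat) : Int) := by omega
  rw [hc, pacc_pyGetD f L (idxN - 1) (by omega), Nat.sub_add_cancel (by omega)]

-- the per-iteration body of A's loop equals the per-i inner loop of B
theorem step_eq (m i x ans : Int) (kf : Int → Int) (L : List Int) (idxN : Nat)
    (hperm : L.Perm (PySem.List.pyRange 0 m 1))
    (hidx : idxN ≤ L.length)
    (hP : ∀ j ∈ L.take idxN, kf j < x)
    (hS : ∀ j ∈ L.drop idxN, x ≤ kf j) :
    (if (idxN : Int) < m then
       (if 0 < (idxN : Int) then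
          ans + ((i * (idxN : Int) - PySem.List.pyGetD (pyAccumulate (fun prev j => prev + j) 0 L) ((idxN : Int) - 1) 0) * x
                 - i * PySem.List.pyGetD (pyAccumulate (fun prev j => prev + kf j) 0 L) ((idxN : Int) - 1) 0
                 + PySem.List.pyGetD (pyAccumulate (fun prev j => prev + j * kf j) 0 L) ((idxN : Int) - 1) 0)
        else ans)
       + (-(i * (m - (idxN : Int)) - (PySem.List.pyGetD (pyAccumulate (fun prev j => prev + j) 0 L) (-1) 0
             - (if (idxN : Int) ≠ 0 then PySem.List.pyGetD (pyAccumulate (fun prev j => prev + j) 0 L) ((idxN : Int) - 1) 0 else 0))) * x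
          + i * (PySem.List.pyGetD (pyAccumulate (fun prev j => prev + kf j) 0 L) (-1) 0
             - (if (idxN : Int) ≠ 0 then PySem.List.pyGetD (pyAccumulate (fun prev j => prev + kf j) 0 L) ((idxN : Int) - 1) 0 else 0))
          - (PySem.List.pyGetD (pyAccumulate (fun prev j => prev + j * kf j) 0 L) (-1) 0
             - (if (idxN : Int) ≠ 0 then PySem.List.pyGetD (pyAccumulate (fun prev j => prev + j * kf j) 0 L) ((idxN : Int) - 1) 0 else 0)))
     else
       (if 0 < (idxN : Int) then
          ans + ((i * (idxN : Int) - PySem.List.pyGetD (pyAccumulate (fun prev j => prev + j) 0 L) ((idxN : Int) - 1) 0) * x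
                 - i * PySem.List.pyGetD (pyAccumulate (fun prev j => prev + kf j) 0 L) ((idxN : Int) - 1) 0
                 + PySem.List.pyGetD (pyAccumulate (fun prev j => prev + j * kf j) 0 L) ((idxN : Int) - 1) 0)
        else ans))
    = (PySem.List.pyRange 0 m 1).foldl (fun a j => a + (i - j) * |x - kf j|) ans := by
  have hlen : L.length = (m - 0).toNat := by
    have := hperm.length_eq
    simpa [PySem.List.length_pyRange_one] using this
  have hPl : ((L.take idxN).length : Int) = (idxN : Int) := by
    rw [List.length_take]; omega
  have hSl : ((L.drop idxN).length : Int) = (L.length : Int) - (idxN : Int) := by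
    rw [List.length_drop, Nat.cast_sub hidx]
  -- right-hand side as a sum over P ++ S
  rw [PySem.List.foldl_add (PySem.List.pyRange 0 m 1) (fun j => (i - j) * |x - kf j|) ans]
  have hpsum : (((PySem.List.pyRange 0 m 1)).map (fun j => (i - j) * |x - kf j|)).sum
      = ((L.take idxN).map (fun j => (i - j) * |x - kf j|)).sum
        + ((L.drop idxN).map (fun j => (i - j) * |x - kf j|)).sum := by
    rw [← (hperm.map (fun j => (i - j) * |x - kf j|)).sum_eq]
    conv_lhs => rw [← List.take_append_drop idxN L]
    rw [List.map_append, List.sum_append]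
  rw [hpsum, sum_expand_lt i x kf (L.take idxN) hP, sum_expand_ge i x kf (L.drop idxN) hS,
      hPl, hSl]
  -- whole-list sums split at idxN
  have hs1 : L.sum = (L.take idxN).sum + (L.drop idxN).sum := by
    conv_lhs => rw [← List.take_append_drop idxN L]
    rw [List.sum_append]
  have hs2 : (L.map kf).sum = ((L.take idxN).map kf).sum + ((L.drop idxN).map kf).sum := by
    conv_lhs => rw [← List.take_append_drop idxN L]
    rw [List.map_append, List.sum_append]
  have hs3 : (L.map (fun j => j * kf j)).sum
      = ((L.take idxN).map (fun j => j * kf j)).sum + ((L.drop idxN).map (fun j => j * kf j)).sum := by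
    conv_lhs => rw [← List.take_append_drop idxN L]
    rw [List.map_append, List.sum_append]
  by_cases hz : idxN = 0
  · have hPnil : L.take idxN = [] := by rw [hz, List.take_zero]
    have hDall : L.drop idxN = L := by rw [hz, List.drop_zero]
    rw [if_neg (by omega : ¬ (0:Int) < (idxN : Int))]
    by_cases hm0 : (idxN : Int) < m
    · have hL0 : 0 < L.length := by omega
      have hm : (L.length : Int) = m := by omega
      rw [if_pos hm0, if_neg (by omega : ¬ ((idxN : Int) ≠ 0)),
          if_neg (by omega : ¬ ((idxN : Int) ≠ 0)), if_neg (by omega : ¬ ((idxN : Int) ≠ 0)),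
          pacc_pyGetD_last _ L hL0, pacc_pyGetD_last _ L hL0, pacc_pyGetD_last _ L hL0,
          foldl_sum_id, foldl_sum_kf, foldl_sum_mul, hPnil, hDall]
      simp only [List.map_nil, List.sum_nil]
      have hc : (idxN : Int) = 0 := by omega
      rw [hc, ← hm]
      ring
    · have hLnil : L = [] := List.eq_nil_of_length_eq_zero (by omega)
      rw [if_neg hm0, hPnil, hDall, hLnil]
      simp [hz]
  · have hne : (idxN : Int) ≠ 0 := by omega
    have h0lt : (0:Int) < (idxN : Int) := by omega
    rw [if_pos h0lt, pacc_prefix _ L idxN hz hidx, pacc_prefix _ L idxN hz hidx,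
        pacc_prefix _ L idxN hz hidx, foldl_sum_id, foldl_sum_kf, foldl_sum_mul]
    by_cases hm1 : (idxN : Int) < m
    · have hL0 : 0 < L.length := by omega
      have hm : (L.length : Int) = m := by omega
      rw [if_pos hm1, if_pos hne, if_pos hne, if_pos hne,
          pacc_pyGetD_last _ L hL0, pacc_pyGetD_last _ L hL0, pacc_pyGetD_last _ L hL0,
          foldl_sum_id, foldl_sum_kf, foldl_sum_mul, hs1, hs2, hs3, ← hm]
      ring
    · rw [if_neg hm1]
      have hdl : L.drop idxN = [] := List.drop_eq_nil_of_le (by omega)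
      rw [hdl]
      simp only [List.map_nil, List.sum_nil]
      have hLi : (L.length : Int) = (idxN : Int) := by omega
      rw [hLi]
      ring

theorem calc_eq (n : Int) (coords_a : List Int) (m : Int) (coords_b : List Int) :
    calc_py n coords_a m coords_b = calc_py_alt n coords_a m coords_b := by
  simp only [calc_py, calc_py_alt]
  have hf : (fun (ans i : Int) =>
        let x := PySem.List.pyGetD coords_a i 0
        let idx : Int := (PySem.List.bisectLeft
          (((PySem.List.sorted (PySem.List.pyRange 0 m 1) (fun j => PySem.List.pyGetD coords_b j 0))).map
            (fun j => PySem.List.pyGetD coords_b j 0)) x : Nat)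
        let L := PySem.List.sorted (PySem.List.pyRange 0 m 1) (fun j => PySem.List.pyGetD coords_b j 0)
        let ps1 := pyAccumulate (fun prev j => prev + j) 0 L
        let ps2 := pyAccumulate (fun prev j => prev + (fun j => PySem.List.pyGetD coords_b j 0) j) 0 L
        let ps3 := pyAccumulate (fun prev j => prev + j * (fun j => PySem.List.pyGetD coords_b j 0) j) 0 L
        let ans1 :=
          if 0 < idx then
            ans + ((i * idx - PySem.List.pyGetD ps1 (idx - 1) 0) * x
                   - i * PySem.List.pyGetD ps2 (idx - 1) 0
                   + PySem.List.pyGetD ps3 (idx - 1) 0)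
          else ans
        if idx < m then
          ans1 + (-(i * (m - idx) - (PySem.List.pyGetD ps1 (-1) 0
                    - (if idx ≠ 0 then PySem.List.pyGetD ps1 (idx - 1) 0 else 0))) * x
                  + i * (PySem.List.pyGetD ps2 (-1) 0
                    - (if idx ≠ 0 then PySem.List.pyGetD ps2 (idx - 1) 0 else 0))
                  - (PySem.List.pyGetD ps3 (-1) 0
                    - (if idx ≠ 0 then PySem.List.pyGetD ps3 (idx - 1) 0 else 0)))
        else ans1)
      = (fun (ans i : Int) =>
        (PySem.List.pyRange 0 m 1).foldl
          (fun a j => a + (i - j) * |PySem.List.pyGetD coords_a i 0 - PySem.List.pyGetD coords_b j 0|) ans) := by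
    funext ans i
    have hpw := PySem.List.sorted_map_key_pairwise (PySem.List.pyRange 0 m 1)
      (fun j => PySem.List.pyGetD coords_b j 0)
    obtain ⟨h1, h2, h3⟩ := PySem.List.bisectLeft_spec
      (((PySem.List.sorted (PySem.List.pyRange 0 m 1) (fun j => PySem.List.pyGetD coords_b j 0))).map
        (fun j => PySem.List.pyGetD coords_b j 0))
      (PySem.List.pyGetD coords_a i 0) hpw
    rw [List.length_map] at h1
    refine step_eq m i (PySem.List.pyGetD coords_a i 0) ans
      (fun j => PySem.List.pyGetD coords_b j 0)
      (PySem.List.sorted (PySem.List.pyRange 0 m 1) (fun j => PySem.List.pyGetD coords_b j 0))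
      (PySem.List.bisectLeft
        (((PySem.List.sorted (PySem.List.pyRange 0 m 1) (fun j => PySem.List.pyGetD coords_b j 0))).map
          (fun j => PySem.List.pyGetD coords_b j 0)) (PySem.List.pyGetD coords_a i 0))
      (PySem.List.sorted_perm _ _ _) h1 ?_ ?_
    · intro j hj
      rw [List.mem_take_iff_getElem] at hj
      obtain ⟨k, hk, rfl⟩ := hj
      have hk2 : k < (PySem.List.sorted (PySem.List.pyRange 0 m 1) (fun j => PySem.List.pyGetD coords_b j 0)).length := by omega
      have := h2 k (by simpa using hk2) (by omega)
      simpa using this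
    · intro j hj
      obtain ⟨k, hk, rfl⟩ := List.getElem_of_mem hj
      rw [List.getElem_drop] at *
      have hk2 := hk
      rw [List.length_drop] at hk2
      have := h3 (PySem.List.bisectLeft
        (((PySem.List.sorted (PySem.List.pyRange 0 m 1) (fun j => PySem.List.pyGetD coords_b j 0))).map
          (fun j => PySem.List.pyGetD coords_b j 0)) (PySem.List.pyGetD coords_a i 0) + k)
        (by simpa using (by omega : PySem.List.bisectLeft
          (((PySem.List.sorted (PySem.List.pyRange 0 m 1) (fun j => PySem.List.pyGetD coords_b j 0))).map
            (fun j => PySem.List.pyGetD coords_b j 0)) (PySem.List.pyGetD coords_a i 0) + k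
          < (PySem.List.sorted (PySem.List.pyRange 0 m 1) (fun j => PySem.List.pyGetD coords_b j 0)).length))
        (by omega)
      simpa using this
  rw [hf]

-- ===== VERDICT (by name: the statement is the Claim_ definition above) =====
theorem calc_py_spec : Claim_equal_calc_py := by
  intro n a m b _ _
  unfold Spec_calc_py
  exact calc_eq n a m b
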